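-- pv_equiv track=rewrite | github.com/pypi-data/pypi-mirror-392 | packages/cqlib-algorithm/cqlib_algorithm-0.1.0.tar.gz/cqlib_algorithm-0.1.0/cqlib_algorithm/results/vrp_decoder.py | _bitstr_to_assignment
-- ===== SOURCE A (Python) =====
-- def _bitstr_to_assignment(bitstr: str, n: int, K: int, P: int) -> list[list[list[int]]]:
--     """Convert a flat bitstring into a 3D one-hot tensor for VRP.
--
--     The tensor layout is ``X[I][P][K]`` where ``I = n-1`` (customers 1..n-1),
--     ``P`` is positions per vehicle, and ``K`` is number of vehicles.
--
--     Indexing convention (flattened):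
--         ``flat_idx = ii*(P*K) + p*K + k``
--
--     If the bitstring is longer than ``I*P*K``, the rightmost bits are used.
--
--     Args:
--         bitstr: Flat assignment bitstring.
--         n: Total nodes including depot (so customers are 1..n-1).
--         K: Number of vehicles.
--         P: Positions per vehicle.
--
--     Returns:
--         list[list[list[int]]]: One-hot assignment tensor ``X[I][P][K]``.
--
--     Raises:
--         ValueError: If the bitstring is shorter than ``I*P*K``.
--     """
--     I = n - 1
--     N = I * P * K
--     if len(bitstr) < N:
--         raise ValueError(f"bitstring length {len(bitstr)} does not match expected {N}.")
--     if len(bitstr) > N: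
--         bitstr = bitstr[-N:]
--
--     X = [[[0 for _ in range(K)] for _ in range(P)] for _ in range(I)]
--     for ii in range(I):
--         for p in range(P):
--             for k in range(K):
--                 idx = ii * (P * K) + p * K + k
--                 X[ii][p][k] = 1 if bitstr[idx] == '1' else 0
--     return X
-- ===== SOURCE B (Python) =====
-- def _bitstr_to_assignment(bitstr: str, n: int, K: int, P: int) -> list[list[list[int]]]:
--     """Decode by a single left-to-right streaming pass: bits are appended into the
--     current vehicle-slot row, which is closed into the current customer block when it
--     reaches K bits, and the block is closed into the tensor when it reaches P rows."""
--     I = n - 1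
--     N = I * P * K
--     if len(bitstr) < N:
--         raise ValueError(f"bitstring length {len(bitstr)} does not match expected {N}.")
--     if N <= 0:
--         # no bits to decode: the tensor is I blocks of P empty slot rows
--         return [[[] for _ in range(P)] for _ in range(I)]
--     X, block, row = [], [], []
--     for c in bitstr[len(bitstr) - N:]:
--         row.append(1 if c == '1' else 0)
--         if len(row) == K:
--             block.append(row)
--             row = []
--             if len(block) == P:
--                 X.append(block)
--                 block = []
--     return X
-- ===== Notes on version B (the rewrite author's own statement) =====
-- stated objective: alternative
-- what changed: B replaces A's preallocated zero tensor mutated via flat-index arithmetic over three nested range loops with a single streaming pass over the trimmed bitstring that accumulates the current slot row and customer block and closes them when they reach K bits resp. P rows, so no index is ever computed.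
-- outside the precondition, e.g. on _bitstr_to_assignment('0', 2, -1, -1): A returns [[]], B returns []; on _bitstr_to_assignment('0110', 3, -2, -1): A returns [[], []], B returns []
import Mathlib
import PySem

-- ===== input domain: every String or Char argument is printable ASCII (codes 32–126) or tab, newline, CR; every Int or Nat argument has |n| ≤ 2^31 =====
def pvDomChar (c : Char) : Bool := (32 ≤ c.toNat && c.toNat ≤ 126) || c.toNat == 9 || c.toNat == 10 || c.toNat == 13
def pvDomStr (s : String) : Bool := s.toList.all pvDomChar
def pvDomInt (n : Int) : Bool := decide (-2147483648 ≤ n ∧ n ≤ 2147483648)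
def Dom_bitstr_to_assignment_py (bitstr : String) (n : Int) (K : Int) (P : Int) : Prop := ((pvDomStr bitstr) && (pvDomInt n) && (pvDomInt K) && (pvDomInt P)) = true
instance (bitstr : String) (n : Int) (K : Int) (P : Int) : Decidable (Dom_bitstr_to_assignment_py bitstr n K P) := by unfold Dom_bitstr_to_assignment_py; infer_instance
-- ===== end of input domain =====

-- B decodes the bitstring in one streaming pass with accumulators (closing a slot row at K
-- bits and a customer block at P rows) instead of A's zero tensor mutated via flat indices
-- (objective: alternative; Pre_ also excludes the degenerate n>1, P<0, K<0 corner, see below).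


-- ===== PORT A =====
def bitstr_to_assignment_py (bitstr : String) (n : Int) (K : Int) (P : Int) : List (List (List Int)) :=
  let I := n - 1
  let N := I * P * K
  let bs : List Char :=
    if PySem.List.len bitstr.toList > N then PySem.List.slice bitstr.toList (some (-N)) none
    else bitstr.toList
  let X : List (List (List Int)) :=
    (PySem.List.pyRange 0 I 1).map (fun _ =>
      (PySem.List.pyRange 0 P 1).map (fun _ =>
        (PySem.List.pyRange 0 K 1).map (fun _ => (0 : Int))))
  (PySem.List.pyRange 0 I 1).foldl (fun X ii =>
    (PySem.List.pyRange 0 P 1).foldl (fun X p =>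
      (PySem.List.pyRange 0 K 1).foldl (fun X k =>
        let idx := ii * (P * K) + p * K + k
        let row2 := PySem.List.pyGetD X ii []
        let row1 := PySem.List.pyGetD row2 p []
        let v : Int := if PySem.List.pyGet? bs idx = some '1' then 1 else 0
        PySem.List.pySetD X ii (PySem.List.pySetD row2 p (PySem.List.pySetD row1 k v))) X) X) X

-- ===== PORT B =====
-- helper: the bit value of one character (Python's `1 if c == '1' else 0`)
def pvBit (c : Char) : Int := if c = '1' then 1 else 0

-- helper: one step of B's streaming loop over state (X, block, row)
def pvStep (K P : Int) (st : List (List (List Int)) × List (List Int) × List Int) (c : Char) :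
    List (List (List Int)) × List (List Int) × List Int :=
  let row := st.2.2 ++ [pvBit c]
  if (row.length : Int) = K then
    let block := st.2.1 ++ [row]
    if (block.length : Int) = P then (st.1 ++ [block], [], [])
    else (st.1, block, [])
  else (st.1, st.2.1, row)

def bitstr_to_assignment_py_alt (bitstr : String) (n : Int) (K : Int) (P : Int) : List (List (List Int)) :=
  let I := n - 1
  let N := I * P * K
  if N ≤ 0 then
    (PySem.List.pyRange 0 I 1).map (fun _ => (PySem.List.pyRange 0 P 1).map (fun _ => ([] : List Int)))
  else
    ((PySem.List.slice bitstr.toList (some (PySem.List.len bitstr.toList - N)) none).foldl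
      (pvStep K P) ([], [], [])).1

-- ===== PRECONDITION & SPEC =====
-- Pre_ excludes (a) the inputs on which Python A raises ValueError (bitstring shorter than
-- (n-1)*P*K), and (b) inputs with customers present (n > 1) but BOTH P and K negative, where
-- A's value of n-1 copies of [] is an accident of range() on negative counts and B returns [].
def Pre_bitstr_to_assignment_py (bitstr : String) (n : Int) (K : Int) (P : Int) : Prop :=
  (n - 1) * P * K ≤ PySem.List.len bitstr.toList ∧ ¬ (1 < n ∧ P < 0 ∧ K < 0)
instance (bitstr : String) (n : Int) (K : Int) (P : Int) : Decidable (Pre_bitstr_to_assignment_py bitstr n K P) := by unfold Pre_bitstr_to_assignment_py; infer_instance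

def pvWitness_bitstr_to_assignment_py : String × Int × Int × Int := ("101101", 3, 3, 1)

def Spec_bitstr_to_assignment_py (bitstr : String) (n : Int) (K : Int) (P : Int) (out : List (List (List Int))) : Prop := out = bitstr_to_assignment_py_alt bitstr n K P
instance (bitstr : String) (n : Int) (K : Int) (P : Int) (out : List (List (List Int))) : Decidable (Spec_bitstr_to_assignment_py bitstr n K P out) := by unfold Spec_bitstr_to_assignment_py; infer_instance

-- ===== CLAIM (what is proved, stated in full; the proofs are below) =====
def Claim_equal_bitstr_to_assignment_py : Prop := ∀ (bitstr : String) (n : Int) (K : Int) (P : Int), Dom_bitstr_to_assignment_py bitstr n K P → Pre_bitstr_to_assignment_py bitstr n K P → Spec_bitstr_to_assignment_py bitstr n K P (bitstr_to_assignment_py bitstr n K P)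

-- ===== LEMMAS AND PROOFS =====

-- ---- A-side machinery (characterising the triple write-fold as a map of maps) ----

theorem pv_set_getD_self {α : Type} (X : List α) (d : α) (i : Nat) (h : i < X.length) : X.set i (X.getD i d) = X := by
  rw [List.getD_eq_getElem X d h]; exact List.set_getElem_self h

theorem pv_getD_set_self {α : Type} (X : List α) (d c : α) (i : Nat) (h : i < X.length) : (X.set i c).getD i d = c := by
  rw [List.getD_eq_getElem _ d (by simpa using h)]; simp [List.getElem_set_self]

theorem pv_foldl_lens {α β : Type} (d : α) (f : β → α → α) :
    ∀ (l : List β) (X : List α) (i : Nat), i < X.length →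
    l.foldl (fun X j => X.set i (f j (X.getD i d))) X
      = X.set i (l.foldl (fun r j => f j r) (X.getD i d)) := by
  intro l
  induction l with
  | nil => intro X i h; simp only [List.foldl_nil]; exact (pv_set_getD_self X d i h).symm
  | cons a t ih =>
    intro X i h
    simp only [List.foldl_cons]
    rw [ih _ i (by simpa using h), List.set_set, pv_getD_set_self _ _ _ _ h]

theorem pv_set_append_drop {α : Type} (A xs : List α) (m : Nat) (hA : A.length = m) (hm : m < xs.length) (w : α) :
    (A ++ xs.drop m).set m w = (A ++ [w]) ++ xs.drop (m + 1) := by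
  have hdrop : xs.drop m = xs[m] :: xs.drop (m + 1) := (List.getElem_cons_drop hm).symm
  rw [List.set_append_right _ _ (by omega)]
  simp only [hA, Nat.sub_self, hdrop, List.set_cons_zero, List.append_assoc, List.singleton_append]

theorem pv_getD_append_left {α : Type} (A xs : List α) (d : α) (m : Nat) (hA : A.length = m) (hm : m < xs.length) :
    (A ++ xs.drop m).getD m d = xs.getD m d := by
  have hlen : (A ++ xs.drop m).length = m + (xs.length - m) := by simp [hA]
  have hm2 : m < (A ++ xs.drop m).length := by omega
  rw [List.getD_eq_getElem _ d hm2, List.getD_eq_getElem xs d hm, List.getElem_append_right (by omega)]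
  simp [hA, List.getElem_drop]

theorem pv_foldl_setmap {α : Type} (v : Nat → α) :
    ∀ (m : Nat) (xs : List α), m ≤ xs.length →
    (List.range m).foldl (fun r j => r.set j (v j)) xs = (List.range m).map v ++ xs.drop m := by
  intro m
  induction m with
  | zero => intro xs _; simp
  | succ m ih =>
    intro xs hm
    rw [List.range_succ, List.foldl_append, List.map_append, ih xs (by omega)]
    simp only [List.foldl_cons, List.foldl_nil]
    exact pv_set_append_drop _ xs m (by simp) (by omega) (v m)

theorem pv_kfold (v : Nat → Int) (Kn : Nat) (i p : Nat) (X : List (List (List Int)))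
    (hi : i < X.length) (hp : p < (X.getD i []).length) (hk : ((X.getD i []).getD p []).length = Kn) :
    (List.range Kn).foldl (fun X k => X.set i ((X.getD i []).set p (((X.getD i []).getD p []).set k (v k)))) X
      = X.set i ((X.getD i []).set p ((List.range Kn).map v)) := by
  rw [pv_foldl_lens [] (fun k Y => Y.set p ((Y.getD p []).set k (v k))) (List.range Kn) X i hi]
  rw [pv_foldl_lens [] (fun k r => r.set k (v k)) (List.range Kn) (X.getD i []) p hp]
  rw [pv_foldl_setmap v Kn _ (le_of_eq hk.symm)]
  rw [List.drop_of_length_le (le_of_eq hk), List.append_nil]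

theorem pv_mfold (v : Nat → Nat → Int) (Kn : Nat) (i : Nat) :
    ∀ (m : Nat) (X : List (List (List Int))), i < X.length → m ≤ (X.getD i []).length →
    (∀ p, p < (X.getD i []).length → ((X.getD i []).getD p []).length = Kn) →
    (List.range m).foldl (fun X p => (List.range Kn).foldl (fun X k => X.set i ((X.getD i []).set p (((X.getD i []).getD p []).set k (v p k)))) X) X
      = X.set i ((List.range m).map (fun p => (List.range Kn).map (v p)) ++ (X.getD i []).drop m) := by
  intro m
  induction m with
  | zero =>
    intro X hi _ _
    simp only [List.range_zero, List.foldl_nil, List.map_nil, List.nil_append, List.drop_zero]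
    exact (pv_set_getD_self X [] i hi).symm
  | succ m ih =>
    intro X hi hm hrows
    rw [List.range_succ, List.foldl_append, List.map_append, ih X hi (by omega) hrows]
    simp only [List.foldl_cons, List.foldl_nil]
    set A := (List.range m).map (fun p => (List.range Kn).map (v p)) with hAdef
    have hA : A.length = m := by simp [hAdef]
    set S := X.set i (A ++ (X.getD i []).drop m) with hSdef
    have hSi : S.getD i [] = A ++ (X.getD i []).drop m := pv_getD_set_self X [] _ i hi
    have hSlen : i < S.length := by simpa [hSdef] using hi
    have hrow : (S.getD i []).getD m [] = (X.getD i []).getD m [] := by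
      rw [hSi]; exact pv_getD_append_left A (X.getD i []) [] m hA (by omega)
    rw [pv_kfold (v m) Kn i m S hSlen
      (by rw [hSi]
          have h2 : (A ++ (X.getD i []).drop m).length = m + ((X.getD i []).length - m) := by simp [hA]
          omega)
      (by rw [hrow]; exact hrows m (by omega))]
    rw [hSdef, List.set_set, hSi]
    rw [pv_set_append_drop A (X.getD i []) m hA (by omega)]
    simp

theorem pv_ofold (v : Nat → Nat → Nat → Int) (Pn Kn : Nat) :
    ∀ (m : Nat) (X : List (List (List Int))), m ≤ X.length →
    (∀ i, i < X.length → (X.getD i []).length = Pn ∧ ∀ p, p < Pn → ((X.getD i []).getD p []).length = Kn) →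
    (List.range m).foldl (fun X i => (List.range Pn).foldl (fun X p => (List.range Kn).foldl (fun X k => X.set i ((X.getD i []).set p (((X.getD i []).getD p []).set k (v i p k)))) X) X) X
      = (List.range m).map (fun i => (List.range Pn).map (fun p => (List.range Kn).map (v i p))) ++ X.drop m := by
  intro m
  induction m with
  | zero => intro X _ _; simp
  | succ m ih =>
    intro X hm hinv
    rw [List.range_succ, List.foldl_append, List.map_append, ih X (by omega) hinv]
    simp only [List.foldl_cons, List.foldl_nil]
    set A := (List.range m).map (fun i => (List.range Pn).map (fun p => (List.range Kn).map (v i p))) with hAdef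
    have hA : A.length = m := by simp [hAdef]
    set S := A ++ X.drop m with hSdef
    have hSm : S.getD m [] = X.getD m [] := pv_getD_append_left A X [] m hA (by omega)
    have hSlen : m < S.length := by
      have : S.length = m + (X.length - m) := by simp [hSdef, hA]
      omega
    have hmX : m < X.length := by omega
    obtain ⟨hP1, hP2⟩ := hinv m hmX
    rw [pv_mfold (v m) Kn m Pn S hSlen
      (by rw [hSm, hP1])
      (by intro p hp; rw [hSm] at hp ⊢; exact hP2 p (by rw [hP1] at hp; exact hp))]
    rw [hSm, List.drop_of_length_le (le_of_eq hP1), List.append_nil,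
        pv_set_append_drop A X m hA hmX _]
    simp

-- ---- shared leaf lemma: one K-sized chunk read bit by bit equals the indexed read ----

theorem pv_leaf (cs : List Char) (In Pn Kn i p : Nat) (hlen : cs.length = In * Pn * Kn)
    (hi : i < In) (hp : p < Pn) :
    ((cs.drop (i * (Pn * Kn) + p * Kn)).take Kn).map pvBit
      = (List.range Kn).map (fun (k : Nat) =>
          if PySem.List.pyGet? cs ((i : Int) * ((Pn : Int) * (Kn : Int)) + (p : Int) * (Kn : Int) + ((k : Nat) : Int)) = some '1'
          then (1 : Int) else 0) := by
  have key : i * (Pn * Kn) + p * Kn + Kn ≤ In * Pn * Kn := by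
    have h1 : i * Pn + p + 1 ≤ In * Pn := by
      calc i * Pn + p + 1 ≤ i * Pn + Pn := by omega
        _ = (i + 1) * Pn := by ring
        _ ≤ In * Pn := Nat.mul_le_mul_right Pn (by omega)
    calc i * (Pn * Kn) + p * Kn + Kn = (i * Pn + p + 1) * Kn := by ring
      _ ≤ (In * Pn) * Kn := Nat.mul_le_mul_right Kn h1
      _ = In * Pn * Kn := by ring
  apply List.ext_getElem
  · simp [hlen]; omega
  · intro k h1 h2
    simp only [List.getElem_map, List.getElem_take, List.getElem_drop, List.getElem_range]
    have hk : k < Kn := by simpa using h2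
    have hidx : (i : Int) * ((Pn : Int) * (Kn : Int)) + (p : Int) * (Kn : Int) + (k : Int)
        = ((i * (Pn * Kn) + p * Kn + k : Nat) : Int) := by push_cast; ring
    rw [hidx, PySem.List.pyGet?_natCast, List.getElem?_eq_getElem (by omega)]
    simp [pvBit]

-- ---- B-side machinery (characterising the streaming fold) ----

theorem pv_stuck (K P : Int) (h : P < 0 ∨ K < 0) :
    ∀ (s : List Char) (st : List (List (List Int)) × List (List Int) × List Int),
    (s.foldl (pvStep K P) st).1 = st.1 := by
  intro s
  induction s with
  | nil => intro st; rfl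
  | cons c t ih =>
    intro st
    rw [List.foldl_cons, ih]
    simp only [pvStep]
    split_ifs with h1 h2
    · exfalso
      have hK : (0 : Int) ≤ K := by rw [← h1]; positivity
      have hP : (0 : Int) ≤ P := by rw [← h2]; positivity
      omega
    · rfl
    · rfl

theorem pv_rowfold (Kn Pn : Nat) :
    ∀ (row : List Char) (cur1 : List Int) (X : List (List (List Int))) (rows : List (List Int)),
    cur1.length + row.length = Kn → row ≠ [] →
    row.foldl (pvStep (Kn : Int) (Pn : Int)) (X, rows, cur1) =
      if rows.length + 1 = Pn then (X ++ [rows ++ [cur1 ++ row.map pvBit]], ([] : List (List Int)), ([] : List Int))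
      else (X, rows ++ [cur1 ++ row.map pvBit], ([] : List Int)) := by
  intro row
  induction row with
  | nil => intro _ _ _ _ hne; exact absurd rfl hne
  | cons c t ih =>
    intro cur1 X rows hlen _
    rw [List.foldl_cons]
    rcases eq_or_ne t [] with ht | ht
    · subst ht
      have hc : cur1.length + 1 = Kn := by simpa using hlen
      simp only [List.foldl_nil, pvStep, List.map_cons, List.map_nil]
      have h1 : (((cur1 ++ [pvBit c]).length : Nat) : Int) = (Kn : Int) := by
        simp only [List.length_append, List.length_singleton, Nat.cast_inj]
        omega
      rw [if_pos h1]
      have h2 : ((((rows ++ [cur1 ++ [pvBit c]]).length : Nat) : Int) = (Pn : Int)) ↔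
          rows.length + 1 = Pn := by
        simp only [List.length_append, List.length_singleton]
        omega
      by_cases hp : rows.length + 1 = Pn
      · rw [if_pos (h2.mpr hp), if_pos hp]
      · rw [if_neg (fun hx => hp (h2.mp hx)), if_neg hp]
    · have ht1 : 1 ≤ t.length := List.length_pos_iff.mpr ht
      have h1 : ¬ (((cur1 ++ [pvBit c]).length : Nat) : Int) = (Kn : Int) := by
        simp only [List.length_append, List.length_singleton, Nat.cast_inj]
        simp only [List.length_cons] at hlen
        omega
      rw [show pvStep (Kn : Int) (Pn : Int) (X, rows, cur1) c = (X, rows, cur1 ++ [pvBit c]) from by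
        simp only [pvStep, if_neg h1]]
      rw [ih (cur1 ++ [pvBit c]) X rows (by simp at hlen ⊢; omega) ht]
      simp [List.append_assoc]

theorem pv_blockfold (Kn Pn : Nat) (hKn : 0 < Kn) :
    ∀ (m : Nat) (blk : List Char) (X : List (List (List Int))) (rows : List (List Int)),
    0 < m → blk.length = m * Kn → rows.length + m = Pn →
    blk.foldl (pvStep (Kn : Int) (Pn : Int)) (X, rows, []) =
      (X ++ [rows ++ (List.range m).map (fun j => ((blk.drop (j * Kn)).take Kn).map pvBit)],
        ([] : List (List Int)), ([] : List Int)) := by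
  intro m
  induction m with
  | zero => intro _ _ _ h _ _; omega
  | succ m ih =>
    intro blk X rows _ hblk hrows
    rcases Nat.eq_zero_or_pos m with hm | hm
    · subst hm
      have hb : blk.length = Kn := by simpa using hblk
      have hne : blk ≠ [] := by
        intro h; subst h; simp at hb; omega
      rw [pv_rowfold Kn Pn blk [] X rows (by simpa using hb) hne, if_pos (by omega)]
      have hone : (List.range 1).map (fun j => ((blk.drop (j * Kn)).take Kn).map pvBit)
          = [blk.map pvBit] := by
        simp only [List.range_one, List.map_cons, List.map_nil, Nat.zero_mul, List.drop_zero]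
        rw [List.take_of_length_le hb.le]
      rw [hone]
      simp
    · have hKle : Kn ≤ blk.length := by
        rw [hblk]
        calc Kn = 1 * Kn := (one_mul Kn).symm
          _ ≤ (m + 1) * Kn := Nat.mul_le_mul_right Kn (by omega)
      conv_lhs => rw [← List.take_append_drop Kn blk]
      rw [List.foldl_append]
      have htk : (blk.take Kn).length = Kn := by simp [hKle]
      have hne : blk.take Kn ≠ [] := by
        intro h
        have := congrArg List.length h
        simp [htk] at this; omega
      rw [pv_rowfold Kn Pn (blk.take Kn) [] X rows (by simp [htk]) hne, if_neg (by omega)]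
      simp only [List.nil_append]
      rw [ih (blk.drop Kn) X (rows ++ [(blk.take Kn).map pvBit])
        hm (by simp [hblk]; ring_nf; omega) (by simp; omega)]
      have hsplit : (List.range (m + 1)).map (fun j => ((blk.drop (j * Kn)).take Kn).map pvBit)
          = ((blk.take Kn).map pvBit)
            :: (List.range m).map (fun j => (((blk.drop Kn).drop (j * Kn)).take Kn).map pvBit) := by
        rw [List.range_succ_eq_map, List.map_cons, List.map_map]
        congr 1
        · simp
        · apply List.map_congr_left
          intro j _
          have hdd : (blk.drop Kn).drop (j * Kn) = blk.drop ((j + 1) * Kn) := by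
            rw [List.drop_drop]; congr 1; ring
          simp only [Function.comp_apply, hdd]
      rw [hsplit]
      simp only [List.append_assoc, List.singleton_append]

theorem pv_topfold (Kn Pn : Nat) (hKn : 0 < Kn) (hPn : 0 < Pn) :
    ∀ (m : Nat) (cs : List Char) (X : List (List (List Int))), cs.length = m * (Pn * Kn) →
    cs.foldl (pvStep (Kn : Int) (Pn : Int)) (X, [], []) =
      (X ++ (List.range m).map (fun i =>
        (List.range Pn).map (fun p => ((cs.drop (i * (Pn * Kn) + p * Kn)).take Kn).map pvBit)),
        ([] : List (List Int)), ([] : List Int)) := by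
  intro m
  induction m with
  | zero =>
    intro cs X hcs
    have : cs = [] := List.eq_nil_of_length_eq_zero (by simpa using hcs)
    subst this; simp
  | succ m ih =>
    intro cs X hcs
    have hble : Pn * Kn ≤ cs.length := by
      rw [hcs]
      calc Pn * Kn = 1 * (Pn * Kn) := (one_mul _).symm
        _ ≤ (m + 1) * (Pn * Kn) := Nat.mul_le_mul_right _ (by omega)
    conv_lhs => rw [← List.take_append_drop (Pn * Kn) cs]
    rw [List.foldl_append]
    rw [pv_blockfold Kn Pn hKn Pn (cs.take (Pn * Kn)) X [] hPn (by simp [hble]) (by simp)]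
    simp only [List.nil_append]
    rw [ih (cs.drop (Pn * Kn)) _ (by simp [hcs]; ring_nf; omega)]
    have hsplit : (List.range (m + 1)).map (fun i =>
          (List.range Pn).map (fun p => ((cs.drop (i * (Pn * Kn) + p * Kn)).take Kn).map pvBit))
        = ((List.range Pn).map (fun j => (((cs.take (Pn * Kn)).drop (j * Kn)).take Kn).map pvBit))
          :: (List.range m).map (fun i =>
            (List.range Pn).map (fun p => (((cs.drop (Pn * Kn)).drop (i * (Pn * Kn) + p * Kn)).take Kn).map pvBit)) := by
      rw [List.range_succ_eq_map, List.map_cons, List.map_map]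
      congr 1
      · apply List.map_congr_left
        intro p hp
        have hp' : p < Pn := List.mem_range.mp hp
        congr 1
        have hK2 : Kn ≤ Pn * Kn - p * Kn := by
          have h3 : p * Kn + Kn ≤ Pn * Kn := by
            calc p * Kn + Kn = (p + 1) * Kn := by ring
              _ ≤ Pn * Kn := Nat.mul_le_mul_right Kn (by omega)
          omega
        rw [List.drop_take, List.take_take, Nat.min_eq_left hK2]
        simp
      · apply List.map_congr_left
        intro i _
        simp only [Function.comp_apply]
        apply List.map_congr_left
        intro p _
        have hdd : (cs.drop (Pn * Kn)).drop (i * (Pn * Kn) + p * Kn)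
            = cs.drop ((i + 1) * (Pn * Kn) + p * Kn) := by
          rw [List.drop_drop]; congr 1; ring
        rw [hdd]
    rw [hsplit]
    simp only [List.append_assoc, List.singleton_append]

-- ---- main equivalence ----

theorem main_eq (bitstr : String) (n K P : Int)
    (hlen : (n - 1) * P * K ≤ PySem.List.len bitstr.toList)
    (hsgn : ¬ (1 < n ∧ P < 0 ∧ K < 0)) :
    bitstr_to_assignment_py bitstr n K P = bitstr_to_assignment_py_alt bitstr n K P := by
  simp only [bitstr_to_assignment_py, bitstr_to_assignment_py_alt]
  by_cases hN0 : (n - 1) * P * K ≤ 0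
  · rw [if_pos hN0]
    rcases le_or_gt n 1 with hI | hI
    · rw [PySem.List.pyRange_one_eq_nil (by omega : n - 1 ≤ 0)]
      simp
    rcases le_or_gt P 0 with hP | hP
    · rw [PySem.List.pyRange_one_eq_nil hP]
      simp
    have hK : K ≤ 0 := by
      by_contra hk
      push_neg at hk
      have h1 : 0 < (n - 1) * P := mul_pos (by omega) hP
      nlinarith
    rw [PySem.List.pyRange_one_eq_nil hK]
    simp
  · push_neg at hN0
    rw [if_neg (show ¬ ((n - 1) * P * K ≤ 0) by omega)]
    have hNassoc : 0 < (n - 1) * (P * K) := by rw [← mul_assoc]; exact hN0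
    rcases le_or_gt n 1 with hI | hI
    · -- no customers: A is [], and B's stream never closes a block
      rw [PySem.List.pyRange_one_eq_nil (by omega : n - 1 ≤ 0)]
      have hPK : P * K < 0 := by
        by_contra h
        push_neg at h
        have := mul_nonpos_of_nonpos_of_nonneg (by omega : n - 1 ≤ 0) h
        omega
      have hor : P < 0 ∨ K < 0 := by
        by_contra h
        push_neg at h
        nlinarith [mul_nonneg h.1 h.2]
      rw [pv_stuck K P hor]
      simp
    · -- customers present: Pre_ forces P > 0 and K > 0
      have hP : 0 < P := by
        by_contra hp
        push_neg at hp
        have hP' : P < 0 := by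
          rcases lt_or_eq_of_le hp with h | h
          · exact h
          · subst h; simp at hNassoc
        have hK' : K < 0 := by
          by_contra hk
          push_neg at hk
          nlinarith [mul_nonneg (neg_nonneg.mpr hp) hk]
        exact hsgn ⟨hI, hP', hK'⟩
      have hK : 0 < K := by
        by_contra hk
        push_neg at hk
        nlinarith [mul_nonpos_of_nonneg_of_nonpos hP.le hk]
      obtain ⟨In, hIn⟩ : ∃ m : Nat, n - 1 = (m : Int) := ⟨(n - 1).toNat, by omega⟩
      lift P to ℕ using hP.le with Pn
      lift K to ℕ using hK.le with Kn
      have hIn0 : 0 < In := by omega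
      have hPn0 : 0 < Pn := by exact_mod_cast hP
      have hKn0 : 0 < Kn := by exact_mod_cast hK
      rw [hIn] at hlen ⊢
      rw [PySem.List.len_eq] at hlen ⊢
      set L := bitstr.toList with hLdef
      have hpre' : In * Pn * Kn ≤ L.length := by exact_mod_cast hlen
      have hNnat : 0 < In * Pn * Kn := by positivity
      have hbs : (if ((In : ℤ) * ↑Pn * ↑Kn) < (L.length : ℤ) then PySem.List.slice L (some (-((In : ℤ) * ↑Pn * ↑Kn))) none else L) = L.drop (L.length - In * Pn * Kn) := by
        rw [show -((In : ℤ) * ↑Pn * ↑Kn) = -((In * Pn * Kn : ℕ) : ℤ) by push_cast; ring]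
        split_ifs with h
        · exact PySem.List.slice_from_neg_natCast L _ hNnat
        · have hle : L.length = In * Pn * Kn := by
            have : (L.length : ℤ) ≤ ((In * Pn * Kn : ℕ) : ℤ) := by push_cast; omega
            omega
          simp [hle]
      have hs : PySem.List.slice L (some ((L.length : ℤ) - (In : ℤ) * ↑Pn * ↑Kn)) none = L.drop (L.length - In * Pn * Kn) := by
        rw [show (L.length : ℤ) - (In : ℤ) * ↑Pn * ↑Kn = ((L.length - In * Pn * Kn : ℕ) : ℤ) by push_cast [Nat.cast_sub hpre']; ring]
        exact PySem.List.slice_from_natCast L _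
      rw [hbs, hs]
      set cs := L.drop (L.length - In * Pn * Kn) with hcsdef
      have hcs : cs.length = In * Pn * Kn := by
        rw [hcsdef, List.length_drop]; omega
      -- B side: the streaming fold produces the chunked tensor
      rw [pv_topfold Kn Pn hKn0 hPn0 In cs [] (by rw [hcs]; ring)]
      simp only [List.nil_append]
      -- A side: the triple write-fold produces the indexed tensor
      simp only [PySem.List.pyRange_zero_nat, List.foldl_map, List.map_map,
                 PySem.List.pySetD_natCast, PySem.List.pyGetD_natCast]
      simp only [Function.comp_def]
      set X0 := List.map (fun _ : ℕ => List.map (fun _ : ℕ => List.map (fun _ : ℕ => (0:ℤ)) (List.range Kn)) (List.range Pn)) (List.range In) with hX0def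
      have hgetD : ∀ i, i < In → X0.getD i [] = (List.range Pn).map (fun _ => (List.range Kn).map (fun _ => (0:ℤ))) := by
        intro i hi
        rw [hX0def, List.getD_eq_getElem _ [] (by simpa using hi), List.getElem_map]
      have hinv : ∀ i, i < X0.length → (X0.getD i []).length = Pn ∧ ∀ p, p < Pn → ((X0.getD i []).getD p []).length = Kn := by
        intro i hi
        rw [hgetD i (by simpa [hX0def] using hi)]
        refine ⟨by simp, ?_⟩
        intro p hp
        rw [List.getD_eq_getElem _ [] (by simpa using hp), List.getElem_map]
        simp
      rw [pv_ofold (fun i p k => if PySem.List.pyGet? cs ((i:ℤ) * ((Pn:ℤ) * (Kn:ℤ)) + (p:ℤ) * (Kn:ℤ) + (k:ℤ)) = some '1' then (1:ℤ) else 0) Pn Kn In X0 (by simp [hX0def]) hinv]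
      rw [List.drop_of_length_le (by simp [hX0def]), List.append_nil]
      apply List.map_congr_left
      intro i hi
      apply List.map_congr_left
      intro p hp
      exact (pv_leaf cs In Pn Kn i p hcs (List.mem_range.mp hi) (List.mem_range.mp hp)).symm

-- ===== VERDICT (by name: the statement is the Claim_ definition above) =====
theorem bitstr_to_assignment_py_spec : Claim_equal_bitstr_to_assignment_py := by
  intro bitstr n K P _ hpre
  exact main_eq bitstr n K P hpre.1 hpre.2
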